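-- pv_equiv track=rewrite | github.com/ReallyWarm/oods-works | Sorting/st3.py | somethingDrome
-- ===== SOURCE A (Python) =====
-- def somethingDrome(list):
--     ascend = False
--     descend = False
--     repeat = False
--
--     for i in range(len(list)-1):
--         if list[i] < list[i+1]:
--             ascend = True
--         elif list[i] > list[i+1]:
--             descend = True
--         else:
--             repeat = True
--
--         if ascend and descend:
--             return "Nondrome"
--
--     if ascend:
--         if repeat: return "Plaindrome"
--         return "Metadrome"
--
--     if descend:
--         if repeat: return "Nialpdrome"
--         return "Katadrome"
--
--     return "Repdrome"
-- ===== SOURCE B (Python) =====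
-- def somethingDrome(list):
--     asc = list == sorted(list)
--     desc = list == sorted(list, reverse=True)
--     if asc and desc:
--         return "Repdrome"
--     if asc:
--         return "Metadrome" if len(set(list)) == len(list) else "Plaindrome"
--     if desc:
--         return "Katadrome" if len(set(list)) == len(list) else "Nialpdrome"
--     return "Nondrome"
-- ===== Notes on version B (the rewrite author's own statement) =====
-- stated objective: alternative
-- what changed: Replaces the single-pass flag-accumulating loop with a sort-based classification: compare the list with sorted(list) and sorted(list, reverse=True) to detect monotone direction, and use len(set(list)) == len(list) to detect repeats; trades the O(n) scan for O(n log n) sorting in exchange for a loop-free decomposition.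
import Mathlib
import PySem

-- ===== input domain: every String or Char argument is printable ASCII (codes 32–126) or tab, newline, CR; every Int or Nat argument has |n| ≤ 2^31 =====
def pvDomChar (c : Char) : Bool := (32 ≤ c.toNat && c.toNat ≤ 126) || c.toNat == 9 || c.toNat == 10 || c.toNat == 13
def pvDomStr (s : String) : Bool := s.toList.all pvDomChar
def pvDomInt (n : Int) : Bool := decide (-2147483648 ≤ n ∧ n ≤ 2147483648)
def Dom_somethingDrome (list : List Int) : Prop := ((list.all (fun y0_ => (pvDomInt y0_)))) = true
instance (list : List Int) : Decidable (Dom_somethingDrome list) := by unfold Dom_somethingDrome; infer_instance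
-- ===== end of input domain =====

-- ===== PORT A =====
-- B classifies by comparing the list with its sorted/reverse-sorted copy plus a duplicate
-- test via set size; A accumulates three adjacent-comparison flags in one loop with an
-- early "Nondrome" return. Return values agree on all inputs.

-- A's for-loop over i in range(len-1) comparing list[i] with list[i+1], with the three flags and early return
def somethingDromeLoop : List Int → Bool → Bool → Bool → String
  | a :: b :: rest, ascend, descend, repeat_ =>
    let ascend' := if a < b then true else ascend
    let descend' := if a < b then descend else if a > b then true else descend
    let repeat' := if a < b then repeat_ else if a > b then repeat_ else true
    if ascend' && descend' then "Nondrome"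
    else somethingDromeLoop (b :: rest) ascend' descend' repeat'
  | _, ascend, descend, repeat_ =>
    if ascend then (if repeat_ then "Plaindrome" else "Metadrome")
    else if descend then (if repeat_ then "Nialpdrome" else "Katadrome")
    else "Repdrome"

def somethingDrome (list : List Int) : String :=
  somethingDromeLoop list false false false

-- ===== PORT B =====
def somethingDrome_alt (list : List Int) : String :=
  let asc := list = PySem.List.sorted list (fun x => x) false
  let desc := list = PySem.List.sorted list (fun x => x) true
  if asc ∧ desc then "Repdrome"
  else if asc then
    (if (PySem.Set.ofList list).length = list.length then "Metadrome" else "Plaindrome")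
  else if desc then
    (if (PySem.Set.ofList list).length = list.length then "Katadrome" else "Nialpdrome")
  else "Nondrome"

-- ===== PRECONDITION & SPEC =====
def Spec_somethingDrome (list : List Int) (out : String) : Prop := out = somethingDrome_alt list
instance (list : List Int) (out : String) : Decidable (Spec_somethingDrome list out) := by unfold Spec_somethingDrome; infer_instance

-- ===== CLAIM (what is proved, stated in full; the proofs are below) =====
def Claim_equal_somethingDrome : Prop := ∀ (list : List Int), Dom_somethingDrome list → Spec_somethingDrome list (somethingDrome list)

-- ===== LEMMAS AND PROOFS =====

def pvClassify (a d r : Bool) : String :=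
  if a && d then "Nondrome"
  else if a then (if r then "Plaindrome" else "Metadrome")
  else if d then (if r then "Nialpdrome" else "Katadrome")
  else "Repdrome"

def pvAsc (l : List Int) : Bool := (l.zip l.tail).any (fun p => p.1 < p.2)
def pvDesc (l : List Int) : Bool := (l.zip l.tail).any (fun p => p.1 > p.2)
def pvRep (l : List Int) : Bool := (l.zip l.tail).any (fun p => p.1 == p.2)

theorem loop_eq (l : List Int) : ∀ (a d r : Bool), (a && d) = false →
    somethingDromeLoop l a d r = pvClassify (a || pvAsc l) (d || pvDesc l) (r || pvRep l) := by
  induction l with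
  | nil =>
    intro a d r h
    simp [somethingDromeLoop, pvClassify, pvAsc, pvDesc, pvRep]
    cases a <;> cases d <;> simp_all
  | cons x t ih =>
    intro a d r h
    cases t with
    | nil =>
      simp [somethingDromeLoop, pvClassify, pvAsc, pvDesc, pvRep]
      cases a <;> cases d <;> simp_all
    | cons y t' =>
      simp only [somethingDromeLoop]
      have hA : pvAsc (x :: y :: t') = (decide (x < y) || pvAsc (y :: t')) := by simp [pvAsc]
      have hD : pvDesc (x :: y :: t') = (decide (x > y) || pvDesc (y :: t')) := by simp [pvDesc]
      have hR : pvRep (x :: y :: t') = ((x == y) || pvRep (y :: t')) := by simp [pvRep]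
      rw [hA, hD, hR]
      by_cases hxy : x < y
      · have e1 : decide (x < y) = true := by simpa using hxy
        have e2 : decide (x > y) = false := by simp; omega
        have e3 : (x == y) = false := by simp; omega
        rw [e1, e2, e3]
        by_cases hd : d = true
        · subst hd; simp [pvClassify, hxy]
        · have hd' : d = false := by simpa using hd
          subst hd'
          simp only [hxy, if_true, Bool.and_false]
          rw [ih true false r (by simp)]
          simp [pvClassify]
      · by_cases hyx : x > y
        · have e1 : decide (x < y) = false := by simpa using hxy
          have e2 : decide (x > y) = true := by simpa using hyx
          have e3 : (x == y) = false := by simp; omega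
          rw [e1, e2, e3]
          by_cases ha : a = true
          · subst ha; simp [pvClassify, hxy, hyx]
          · have ha' : a = false := by simpa using ha
            subst ha'
            simp only [hxy, hyx, if_true, if_false, Bool.false_and]
            rw [ih false true r (by simp)]
            simp [pvClassify]
        · have e1 : decide (x < y) = false := by simpa using hxy
          have e2 : decide (x > y) = false := by simpa using hyx
          have e3 : (x == y) = true := by simp; omega
          rw [e1, e2, e3]
          simp only [hxy, hyx, if_false]
          rw [ih a d true h]
          simp [pvClassify, h]

-- adjacent-pair flags as Chain' conditions
theorem pvDesc_false_iff (l : List Int) : pvDesc l = false ↔ l.IsChain (· ≤ ·) := by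
  induction l with
  | nil => simp [pvDesc]
  | cons x t ih =>
    cases t with
    | nil => simp [pvDesc]
    | cons y t' =>
      simp only [pvDesc, List.tail_cons, List.zip_cons_cons, List.any_cons, Bool.or_eq_false_iff,
        List.isChain_cons_cons] at *
      constructor
      · rintro ⟨h1, h2⟩; exact ⟨by simpa using h1, ih.mp (by simpa [pvDesc] using h2)⟩
      · rintro ⟨h1, h2⟩; exact ⟨by simpa using h1, by simpa [pvDesc] using ih.mpr h2⟩

theorem pvAsc_false_iff (l : List Int) : pvAsc l = false ↔ l.IsChain (· ≥ ·) := by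
  induction l with
  | nil => simp [pvAsc]
  | cons x t ih =>
    cases t with
    | nil => simp [pvAsc]
    | cons y t' =>
      simp only [pvAsc, List.tail_cons, List.zip_cons_cons, List.any_cons, Bool.or_eq_false_iff,
        List.isChain_cons_cons] at *
      constructor
      · rintro ⟨h1, h2⟩; exact ⟨by simpa using h1, ih.mp (by simpa [pvAsc] using h2)⟩
      · rintro ⟨h1, h2⟩; exact ⟨by simpa using h1, by simpa [pvAsc] using ih.mpr h2⟩

theorem pvRep_false_iff (l : List Int) : pvRep l = false ↔ l.IsChain (· ≠ ·) := by
  induction l with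
  | nil => simp [pvRep]
  | cons x t ih =>
    cases t with
    | nil => simp [pvRep]
    | cons y t' =>
      simp only [pvRep, List.tail_cons, List.zip_cons_cons, List.any_cons, Bool.or_eq_false_iff,
        List.isChain_cons_cons] at *
      constructor
      · rintro ⟨h1, h2⟩; exact ⟨by simpa using h1, ih.mp (by simpa [pvRep] using h2)⟩
      · rintro ⟨h1, h2⟩; exact ⟨by simpa using h1, by simpa [pvRep] using ih.mpr h2⟩

-- l equals its sorted copy iff no adjacent descent
theorem asc_iff (l : List Int) :
    (l = PySem.List.sorted l (fun x => x) false) ↔ pvDesc l = false := by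
  constructor
  · intro h
    rw [pvDesc_false_iff]
    have hp : (PySem.List.sorted l (fun x => x) false).Pairwise (fun a b => a ≤ b) :=
      PySem.List.sorted_pairwise l (fun x => x)
    rw [← h] at hp
    exact hp.isChain
  · intro h
    rw [pvDesc_false_iff] at h
    have hp : l.Pairwise (· ≤ ·) := List.isChain_iff_pairwise.mp h
    exact (PySem.List.sorted_eq_self_of_pairwise l (fun x => x) hp).symm

theorem desc_iff (l : List Int) :
    (l = PySem.List.sorted l (fun x => x) true) ↔ pvAsc l = false := by
  constructor
  · intro h
    rw [pvAsc_false_iff]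
    have hp : (PySem.List.sorted l (fun x => x) true).Pairwise (fun a b => b ≤ a) :=
      PySem.List.sorted_pairwise_rev l (fun x => x)
    rw [← h] at hp
    exact hp.isChain
  · intro h
    rw [pvAsc_false_iff] at h
    have hp : l.Pairwise (fun a b => b ≤ a) := List.isChain_iff_pairwise.mp h
    exact (PySem.List.sorted_rev_eq_self_of_pairwise l (fun x => x) hp).symm

-- len(set(l)) == len(l) iff l has no duplicates
theorem setlen_iff (l : List Int) :
    ((PySem.Set.ofList l).length = l.length) ↔ l.Nodup := by
  induction l with
  | nil => simp [PySem.Set.ofList_nil]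
  | cons x t ih =>
    rw [PySem.Set.ofList_cons]
    have hfil : PySem.Set.discard (PySem.Set.ofList t) x
        = (PySem.Set.ofList t).filter (fun y => !(y == x)) := by
      simp [PySem.Set.discard]
    have hsub : List.Sublist (PySem.Set.discard (PySem.Set.ofList t) x) (PySem.Set.ofList t) := by
      rw [hfil]; exact List.filter_sublist
    have hlen1 : (PySem.Set.discard (PySem.Set.ofList t) x).length ≤ (PySem.Set.ofList t).length :=
      hsub.length_le
    have hlen2 : (PySem.Set.ofList t).length ≤ t.length := PySem.Set.length_ofList_le t
    constructor
    · intro h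
      simp only [List.length_cons, Nat.add_left_inj] at h
      have heq1 : (PySem.Set.discard (PySem.Set.ofList t) x).length = (PySem.Set.ofList t).length := by omega
      have heq2 : (PySem.Set.ofList t).length = t.length := by omega
      have hnd := ih.mp heq2
      have hxmem : x ∉ t := by
        intro hx
        have hx' : x ∈ PySem.Set.ofList t := (PySem.Set.mem_ofList t x).mpr hx
        have hne : PySem.Set.discard (PySem.Set.ofList t) x ≠ PySem.Set.ofList t := by
          intro he
          have hx'' : x ∈ PySem.Set.discard (PySem.Set.ofList t) x := by rw [he]; exact hx'
          exact ((PySem.Set.mem_discard (PySem.Set.ofList t) x x).mp hx'').2 rfl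
        exact hne (hsub.eq_of_length heq1)
      exact List.nodup_cons.mpr ⟨hxmem, hnd⟩
    · intro h
      rcases List.nodup_cons.mp h with ⟨hx, hnd⟩
      have h1 : PySem.Set.ofList t = t := PySem.Set.ofList_eq_self_of_nodup t hnd
      have h2 : PySem.Set.discard (PySem.Set.ofList t) x = PySem.Set.ofList t := by
        rw [hfil, h1]
        refine List.filter_eq_self.mpr ?_
        intro a ha
        have : (a == x) = false := by
          simp only [beq_eq_false_iff_ne, ne_eq]
          intro he; exact hx (he ▸ ha)
        simpa using this
      rw [h2, h1]

theorem chain_lt_of_le_ne {l : List Int} (h1 : l.IsChain (· ≤ ·)) (h2 : l.IsChain (· ≠ ·)) :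
    l.IsChain (· < ·) := by
  induction l with
  | nil => exact List.isChain_nil
  | cons x t ih =>
    cases t with
    | nil => exact List.isChain_singleton x
    | cons y t' =>
      rw [List.isChain_cons_cons] at *
      exact ⟨lt_of_le_of_ne h1.1 h2.1, ih h1.2 h2.2⟩

theorem chain_gt_of_ge_ne {l : List Int} (h1 : l.IsChain (· ≥ ·)) (h2 : l.IsChain (· ≠ ·)) :
    l.IsChain (· > ·) := by
  induction l with
  | nil => exact List.isChain_nil
  | cons x t ih =>
    cases t with
    | nil => exact List.isChain_singleton x
    | cons y t' =>
      rw [List.isChain_cons_cons] at *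
      exact ⟨lt_of_le_of_ne h1.1 (Ne.symm h2.1), ih h1.2 h2.2⟩

theorem nodup_iff_rep (l : List Int) (h : l.IsChain (· ≤ ·)) :
    l.Nodup ↔ pvRep l = false := by
  constructor
  · intro hnd
    rw [pvRep_false_iff]
    exact hnd.isChain
  · intro hr
    have := chain_lt_of_le_ne h ((pvRep_false_iff l).mp hr)
    exact (List.isChain_iff_pairwise.mp this).imp ne_of_lt

theorem nodup_iff_rep_ge (l : List Int) (h : l.IsChain (· ≥ ·)) :
    l.Nodup ↔ pvRep l = false := by
  constructor
  · intro hnd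
    rw [pvRep_false_iff]
    exact hnd.isChain
  · intro hr
    have hgt := chain_gt_of_ge_ne h ((pvRep_false_iff l).mp hr)
    exact (List.isChain_iff_pairwise.mp hgt).imp (fun hab => (ne_of_lt hab).symm)

theorem alt_eq (l : List Int) : somethingDrome_alt l = pvClassify (pvAsc l) (pvDesc l) (pvRep l) := by
  unfold somethingDrome_alt
  by_cases hA : l = PySem.List.sorted l (fun x => x) false
  · have hd : pvDesc l = false := (asc_iff l).mp hA
    by_cases hB : l = PySem.List.sorted l (fun x => x) true
    · have ha : pvAsc l = false := (desc_iff l).mp hB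
      rw [if_pos ⟨hA, hB⟩]
      simp [pvClassify, ha, hd]
    · have ha : pvAsc l = true := by
        by_contra hc
        exact hB ((desc_iff l).mpr (by simpa using hc))
      rw [if_neg (fun hc => hB hc.2), if_pos hA]
      have hrep := nodup_iff_rep l ((pvDesc_false_iff l).mp hd)
      by_cases hr : pvRep l = true
      · rw [if_neg (fun hc => by simp [hrep.mp ((setlen_iff l).mp hc)] at hr)]
        simp [pvClassify, ha, hd, hr]
      · have hr' : pvRep l = false := by simpa using hr
        rw [if_pos ((setlen_iff l).mpr (hrep.mpr hr'))]
        simp [pvClassify, ha, hd, hr']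
  · have hd : pvDesc l = true := by
      by_contra hc
      exact hA ((asc_iff l).mpr (by simpa using hc))
    by_cases hB : l = PySem.List.sorted l (fun x => x) true
    · have ha : pvAsc l = false := (desc_iff l).mp hB
      rw [if_neg (fun hc => hA hc.1), if_neg hA, if_pos hB]
      have hrep := nodup_iff_rep_ge l ((pvAsc_false_iff l).mp ha)
      by_cases hr : pvRep l = true
      · rw [if_neg (fun hc => by simp [hrep.mp ((setlen_iff l).mp hc)] at hr)]
        simp [pvClassify, ha, hd, hr]
      · have hr' : pvRep l = false := by simpa using hr
        rw [if_pos ((setlen_iff l).mpr (hrep.mpr hr'))]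
        simp [pvClassify, ha, hd, hr']
    · have ha : pvAsc l = true := by
        by_contra hc
        exact hB ((desc_iff l).mpr (by simpa using hc))
      rw [if_neg (fun hc => hA hc.1), if_neg hA, if_neg hB]
      simp [pvClassify, ha, hd]

-- ===== VERDICT (by name: the statement is the Claim_ definition above) =====
theorem somethingDrome_spec : Claim_equal_somethingDrome := by
  intro l _
  unfold Spec_somethingDrome somethingDrome
  rw [loop_eq l false false false (by simp), alt_eq]
  simp
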